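-- pv_equiv track=rewrite | github.com/psubnwell/arsenal | annotation/annotool.bak2.py | reduce_seq
-- ===== SOURCE A (Python) =====
-- def reduce_seq(word, flag, tag):
--     reduced_word = []
--     reduced_flag = []
--     reduced_tag = []
--     for i, (w, f, t) in enumerate(zip(word, flag, tag)):
--         if (i > 0) and ((f, t) == (flag[i-1], tag[i-1])):
--             reduced_word[-1] += w
--         else:
--             reduced_word.append(w)
--             reduced_flag.append(f)
--             reduced_tag.append(t)
--     return {'word':reduced_word, 'flag':reduced_flag, 'tag':reduced_tag}
-- ===== SOURCE B (Python) =====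
-- def reduce_seq(word, flag, tag):
--     items = list(zip(word, flag, tag))
--     rw, rf, rt = [], [], []
--     i, n = 0, len(items)
--     while i < n:
--         w, f, t = items[i]
--         j = i + 1
--         while j < n and (items[j][1], items[j][2]) == (f, t):
--             w += items[j][0]
--             j += 1
--         rw.append(w)
--         rf.append(f)
--         rt.append(t)
--         i = j
--     return {'word': rw, 'flag': rf, 'tag': rt}
-- ===== Notes on version B (the rewrite author's own statement) =====
-- stated objective: alternative
-- what changed: Replaces A's flat enumerate loop that compares each item's (flag,tag) with flag[i-1]/tag[i-1] and patches reduced_word[-1] by a run-detection scan: an outer loop takes each group head and an inner loop consumes the whole run of equal (flag,tag) keys, concatenating the words before appending once.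
import Mathlib
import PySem

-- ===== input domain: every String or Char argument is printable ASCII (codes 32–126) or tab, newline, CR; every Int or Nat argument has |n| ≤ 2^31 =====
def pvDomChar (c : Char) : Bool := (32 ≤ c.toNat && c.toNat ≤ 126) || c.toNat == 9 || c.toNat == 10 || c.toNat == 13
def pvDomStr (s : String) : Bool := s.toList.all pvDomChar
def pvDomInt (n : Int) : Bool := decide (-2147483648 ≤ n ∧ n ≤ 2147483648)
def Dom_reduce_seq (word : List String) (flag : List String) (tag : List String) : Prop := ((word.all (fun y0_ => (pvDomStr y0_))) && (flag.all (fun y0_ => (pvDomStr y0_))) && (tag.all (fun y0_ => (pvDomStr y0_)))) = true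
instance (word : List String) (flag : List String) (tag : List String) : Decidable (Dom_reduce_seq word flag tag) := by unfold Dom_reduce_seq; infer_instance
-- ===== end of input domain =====

-- B replaces A's flat index-comparison loop by a run-detection scan (outer loop per group,
-- inner loop consuming the run of equal (flag,tag) keys); same values, objective: alternative.

-- ===== PORT A =====
-- zip(word, flag, tag): truncates to the shortest list (shared by both ports)
def pvZip3 : List String → List String → List String → List (String × String × String)
  | w :: ws, f :: fs, t :: ts => (w, f, t) :: pvZip3 ws fs ts
  | _, _, _ => []

-- enumerate(...) starting at i
def pvEnumFrom (i : Nat) : List (String × String × String) → List (Nat × String × String × String)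
  | [] => []
  | x :: xs => (i, x) :: pvEnumFrom (i + 1) xs

-- reduced_word[-1] += w  (the [] case is a totality guard; Python never reaches it here)
def pvSetLastAppend : List String → String → List String
  | [], _ => []
  | [x], w => [x ++ w]
  | x :: xs, w => x :: pvSetLastAppend xs w

-- one iteration of A's for-loop body
def pvStepA (flag tag : List String) (st : List String × List String × List String)
    (p : Nat × String × String × String) : List String × List String × List String :=
  let (i, w, f, t) := p
  let (rw, rf, rt) := st
  if decide (i > 0) && (PySem.List.pyGet? flag ((i : Int) - 1) == some f)
      && (PySem.List.pyGet? tag ((i : Int) - 1) == some t) then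
    (pvSetLastAppend rw w, rf, rt)
  else
    (rw ++ [w], rf ++ [f], rt ++ [t])

def reduce_seq (word : List String) (flag : List String) (tag : List String) : List (String × List String) :=
  let st := (pvEnumFrom 0 (pvZip3 word flag tag)).foldl (pvStepA flag tag) ([], [], [])
  [("word", st.1), ("flag", st.2.1), ("tag", st.2.2)]

-- ===== PORT B =====
-- outer while-loop: take the group head, inner while-loop (takeWhile/foldl) consumes the run
def pvGroupB : List (String × String × String) → List String × List String × List String
  | [] => ([], [], [])
  | (w, f, t) :: rest =>
    let run := rest.takeWhile (fun x => x.2.1 == f && x.2.2 == t)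
    let rest' := rest.dropWhile (fun x => x.2.1 == f && x.2.2 == t)
    let w' := run.foldl (fun acc x => acc ++ x.1) w
    let (rw, rf, rt) := pvGroupB rest'
    (w' :: rw, f :: rf, t :: rt)
  termination_by zs => zs.length
  decreasing_by simpa using Nat.lt_succ_of_le (List.length_dropWhile_le _ _)

def reduce_seq_alt (word : List String) (flag : List String) (tag : List String) : List (String × List String) :=
  let st := pvGroupB (pvZip3 word flag tag)
  [("word", st.1), ("flag", st.2.1), ("tag", st.2.2)]

-- ===== PRECONDITION & SPEC =====
def Spec_reduce_seq (word : List String) (flag : List String) (tag : List String) (out : List (String × List String)) : Prop := out = reduce_seq_alt word flag tag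
instance (word : List String) (flag : List String) (tag : List String) (out : List (String × List String)) : Decidable (Spec_reduce_seq word flag tag out) := by unfold Spec_reduce_seq; infer_instance

-- ===== CLAIM (what is proved, stated in full; the proofs are below) =====
def Claim_equal_reduce_seq : Prop := ∀ (word : List String) (flag : List String) (tag : List String), Dom_reduce_seq word flag tag → Spec_reduce_seq word flag tag (reduce_seq word flag tag)

-- ===== LEMMAS AND PROOFS =====

-- prev-key characterisation of A's loop (proof-only helper)
def pvLoopA (prev : String × String) (rw rf rt : List String) :
    List (String × String × String) → List String × List String × List String
  | [] => (rw, rf, rt)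
  | (w, f, t) :: rest =>
    if f == prev.1 && t == prev.2 then
      pvLoopA (f, t) (pvSetLastAppend rw w) rf rt rest
    else
      pvLoopA (f, t) (rw ++ [w]) (rf ++ [f]) (rt ++ [t]) rest

theorem pvZip3_getElem_flag : ∀ (ws fs ts : List String) (i : Nat) (h : i < (pvZip3 ws fs ts).length),
    fs[i]? = some ((pvZip3 ws fs ts)[i].2.1) := by
  intro ws
  induction ws with
  | nil => intro fs ts i h; cases fs <;> cases ts <;> simp [pvZip3] at h
  | cons w ws ih =>
    intro fs ts i h
    cases fs with
    | nil => simp [pvZip3] at h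
    | cons f fs =>
      cases ts with
      | nil => simp [pvZip3] at h
      | cons t ts =>
        cases i with
        | zero => simp [pvZip3]
        | succ i =>
          simp only [pvZip3, List.length_cons, Nat.succ_lt_succ_iff] at h
          simpa [pvZip3] using ih fs ts i h

theorem pvZip3_getElem_tag : ∀ (ws fs ts : List String) (i : Nat) (h : i < (pvZip3 ws fs ts).length),
    ts[i]? = some ((pvZip3 ws fs ts)[i].2.2) := by
  intro ws
  induction ws with
  | nil => intro fs ts i h; cases fs <;> cases ts <;> simp [pvZip3] at h
  | cons w ws ih =>
    intro fs ts i h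
    cases fs with
    | nil => simp [pvZip3] at h
    | cons f fs =>
      cases ts with
      | nil => simp [pvZip3] at h
      | cons t ts =>
        cases i with
        | zero => simp [pvZip3]
        | succ i =>
          simp only [pvZip3, List.length_cons, Nat.succ_lt_succ_iff] at h
          simpa [pvZip3] using ih fs ts i h

theorem pvSetLastAppend_snoc (rw : List String) (x w : String) :
    pvSetLastAppend (rw ++ [x]) w = rw ++ [x ++ w] := by
  induction rw with
  | nil => simp [pvSetLastAppend]
  | cons a rw ih =>
    cases rw with
    | nil => simp [pvSetLastAppend]
    | cons b rw => simpa [pvSetLastAppend] using ih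

-- A's fold over enumerate from index i ≥ 1 equals the prev-key loop
theorem pvFoldA_eq_loopA (word flag tag : List String) :
    ∀ (zs : List (String × String × String)) (i : Nat) (rw rf rt : List String),
      1 ≤ i → zs = (pvZip3 word flag tag).drop i →
      (hprev : i - 1 < (pvZip3 word flag tag).length) →
      (pvEnumFrom i zs).foldl (pvStepA flag tag) (rw, rf, rt) =
        pvLoopA ((pvZip3 word flag tag)[i-1].2) rw rf rt zs := by
  intro zs
  induction zs with
  | nil => intro i rw rf rt hi hz hprev; simp [pvEnumFrom, pvLoopA]
  | cons z zs ih =>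
    intro i rw rf rt hi hz hprev
    obtain ⟨w, f, t⟩ := z
    have hlt : i < (pvZip3 word flag tag).length := by
      by_contra hge
      simp [List.drop_eq_nil_of_le (Nat.le_of_not_lt hge)] at hz
    have hzi : (pvZip3 word flag tag)[i]'hlt = (w, f, t) := by
      have h : ((pvZip3 word flag tag).drop i)[0]? = some (w, f, t) := by
        rw [← hz]; rfl
      rw [List.getElem?_drop] at h
      simpa [List.getElem?_eq_getElem hlt] using h
    have hfl : PySem.List.pyGet? flag ((i : Int) - 1) = some ((pvZip3 word flag tag)[i-1].2.1) := by
      have h1 : ((i : Int) - 1) = ((i - 1 : Nat) : Int) := by omega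
      rw [h1, PySem.List.pyGet?_natCast]
      exact pvZip3_getElem_flag word flag tag (i-1) hprev
    have htl : PySem.List.pyGet? tag ((i : Int) - 1) = some ((pvZip3 word flag tag)[i-1].2.2) := by
      have h1 : ((i : Int) - 1) = ((i - 1 : Nat) : Int) := by omega
      rw [h1, PySem.List.pyGet?_natCast]
      exact pvZip3_getElem_tag word flag tag (i-1) hprev
    have htail : zs = (pvZip3 word flag tag).drop (i + 1) := by
      have := congrArg (List.drop 1) hz
      simpa [List.drop_drop, Nat.add_comm] using this
    have hcond : (decide (i > 0) && (PySem.List.pyGet? flag ((i : Int) - 1) == some f)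
        && (PySem.List.pyGet? tag ((i : Int) - 1) == some t))
        = (f == (pvZip3 word flag tag)[i-1].2.1 && t == (pvZip3 word flag tag)[i-1].2.2) := by
      rw [hfl, htl]
      have : decide (i > 0) = true := by simp; omega
      rw [this]
      cases hbf : (f == (pvZip3 word flag tag)[i-1].2.1)
        <;> cases hbt : (t == (pvZip3 word flag tag)[i-1].2.2)
        <;> simp_all [BEq.comm]
    simp only [pvEnumFrom, List.foldl_cons, pvLoopA, pvStepA]
    rw [hcond]
    have hrec : ∀ rw' rf' rt', (pvEnumFrom (i+1) zs).foldl (pvStepA flag tag) (rw', rf', rt') =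
        pvLoopA ((pvZip3 word flag tag)[i].2) rw' rf' rt' zs := by
      intro rw' rf' rt'
      have := ih (i + 1) rw' rf' rt' (by omega) htail (by simpa using hlt)
      simpa using this
    rw [hrec, hzi]
    split_ifs <;> rfl

-- the prev-key loop seeded with a last group element equals B's grouping pass
theorem pvLoopA_eq_groupB :
    ∀ (zs : List (String × String × String)) (f t w : String) (rw rf rt : List String),
      pvLoopA (f, t) (rw ++ [w]) rf rt zs =
        ((rw ++ [(zs.takeWhile (fun x => x.2.1 == f && x.2.2 == t)).foldl
            (fun acc x => acc ++ x.1) w]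
          ++ (pvGroupB (zs.dropWhile (fun x => x.2.1 == f && x.2.2 == t))).1),
         rf ++ (pvGroupB (zs.dropWhile (fun x => x.2.1 == f && x.2.2 == t))).2.1,
         rt ++ (pvGroupB (zs.dropWhile (fun x => x.2.1 == f && x.2.2 == t))).2.2) := by
  intro zs
  induction zs with
  | nil => intro f t w rw rf rt; simp [pvLoopA, pvGroupB]
  | cons z zs ih =>
    intro f t w rw rf rt
    obtain ⟨w', f', t'⟩ := z
    by_cases hc : (f' == f && t' == t) = true
    · simp only [Bool.and_eq_true, beq_iff_eq] at hc
      obtain ⟨hf, ht⟩ := hc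
      subst hf; subst ht
      simp only [pvLoopA, List.takeWhile_cons, List.dropWhile_cons, beq_self_eq_true,
        Bool.and_self, if_pos, pvSetLastAppend_snoc]
      simpa using ih f' t' (w ++ w') rw rf rt
    · have hcond : (f' == (f, t).1 && t' == (f, t).2) = false := by
        simpa using Bool.eq_false_iff.mpr hc
      simp only [pvLoopA, hcond, Bool.false_eq_true, if_false,
        List.takeWhile_cons, List.dropWhile_cons]
      have := ih f' t' w' (rw ++ [w]) (rf ++ [f']) (rt ++ [t'])
      rw [this]
      simp [pvGroupB, List.foldl_nil]

-- ===== VERDICT (by name: the statement is the Claim_ definition above) =====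
theorem reduce_seq_spec : Claim_equal_reduce_seq := by
  intro word flag tag _
  unfold Spec_reduce_seq reduce_seq reduce_seq_alt
  cases hZ : pvZip3 word flag tag with
  | nil => simp [pvEnumFrom, pvGroupB]
  | cons z Zr =>
    obtain ⟨w0, f0, t0⟩ := z
    have hlen : 0 < (pvZip3 word flag tag).length := by rw [hZ]; simp
    have hdrop : Zr = (pvZip3 word flag tag).drop 1 := by rw [hZ]; rfl
    have h0 : (pvZip3 word flag tag)[0]'hlen = (w0, f0, t0) := by
      simp [hZ]
    simp only [pvEnumFrom, List.foldl_cons]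
    have hstep0 : pvStepA flag tag ([], [], []) (0, w0, f0, t0) = ([w0], [f0], [t0]) := by
      simp [pvStepA]
    rw [hstep0]
    have hmain := pvFoldA_eq_loopA word flag tag Zr 1 [w0] [f0] [t0] (le_refl 1) hdrop
      (by omega)
    rw [hmain]
    have h0' : (pvZip3 word flag tag)[1-1].2 = (f0, t0) := by
      simp [hZ]
    rw [h0']
    have := pvLoopA_eq_groupB Zr f0 t0 w0 [] [f0] [t0]
    simp only [List.nil_append] at this
    rw [this]
    simp [pvGroupB]
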